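-- pv_equiv track=rewrite | github.com/symbiote-h2020/Interpolator | src/main/python/interpolator.py | orderBySegments
-- ===== SOURCE A (Python) =====
-- def orderBySegments(interpolatedByProperty):
--     orderedBySegment=dict()
--
--     for prop, segmentValues in interpolatedByProperty.items():
--         for segID, value in segmentValues.items():
--             if not segID in orderedBySegment:
--                 orderedBySegment[segID]=dict()
--
--             segmentStore=orderedBySegment[segID]
--             segmentStore[prop]=value
--
--     return orderedBySegment
-- ===== SOURCE B (Python) =====
-- def orderBySegments(interpolatedByProperty):
--     segIDs = dict.fromkeys(segID
--                            for segmentValues in interpolatedByProperty.values()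
--                            for segID in segmentValues)
--     return {segID: {prop: segmentValues[segID]
--                     for prop, segmentValues in interpolatedByProperty.items()
--                     if segID in segmentValues}
--             for segID in segIDs}
-- ===== Notes on version B (the rewrite author's own statement) =====
-- stated objective: idiomatic
-- what changed: Instead of streaming every (prop, segID, value) entry into a mutable dict-of-dicts, B first collects the segment IDs in first-encounter order with dict.fromkeys and then builds the transposed result as a nested dict comprehension that re-scans the properties once per segment.
import Mathlib
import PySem

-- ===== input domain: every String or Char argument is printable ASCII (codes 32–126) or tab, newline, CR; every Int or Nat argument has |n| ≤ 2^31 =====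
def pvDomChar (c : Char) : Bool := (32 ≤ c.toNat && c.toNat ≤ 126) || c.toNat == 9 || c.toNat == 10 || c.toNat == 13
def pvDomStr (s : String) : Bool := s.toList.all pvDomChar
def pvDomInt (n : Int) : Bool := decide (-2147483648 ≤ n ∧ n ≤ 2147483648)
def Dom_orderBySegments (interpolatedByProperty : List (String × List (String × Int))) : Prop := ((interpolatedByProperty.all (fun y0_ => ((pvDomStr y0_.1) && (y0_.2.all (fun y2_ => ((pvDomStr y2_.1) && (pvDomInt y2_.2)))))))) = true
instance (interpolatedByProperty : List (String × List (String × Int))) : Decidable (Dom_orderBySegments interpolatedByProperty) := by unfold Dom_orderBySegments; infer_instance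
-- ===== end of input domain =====

-- B replaces A's single streaming pass into a mutable dict-of-dicts by an index-then-gather
-- structure: collect segment IDs in first-encounter order, then a nested dict comprehension
-- (idiomatic alternative; no speed claim).

-- ===== PORT A =====
-- inner loop body: 'if not segID in orderedBySegment: orderedBySegment[segID]=dict()' then
-- 'segmentStore=orderedBySegment[segID]; segmentStore[prop]=value'
def pvAStep (prop : String) (acc : PySem.Dict String (PySem.Dict String Int))
    (q : String × Int) : PySem.Dict String (PySem.Dict String Int) :=
  let acc := if acc.contains q.1 then acc else acc.insert q.1 PySem.Dict.empty
  acc.modify q.1 PySem.Dict.empty (fun s => s.insert prop q.2)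

-- outer loop body: 'for segID, value in segmentValues.items(): …'
def pvAOuter (acc : PySem.Dict String (PySem.Dict String Int))
    (p : String × List (String × Int)) : PySem.Dict String (PySem.Dict String Int) :=
  p.2.foldl (pvAStep p.1) acc

def orderBySegments (interpolatedByProperty : List (String × List (String × Int))) : List (String × List (String × Int)) :=
  let orderedBySegment := interpolatedByProperty.foldl pvAOuter PySem.Dict.empty
  orderedBySegment.items.map (fun p => (p.1, p.2.items))

-- ===== PORT B =====
-- '{prop: segmentValues[segID] for prop, segmentValues in interpolatedByProperty.items() if segID in segmentValues}'
def pvBRow (interpolatedByProperty : List (String × List (String × Int))) (segID : String) : List (String × Int) :=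
  interpolatedByProperty.filterMap (fun p =>
    let inner := PySem.Dict.ofList p.2
    if inner.contains segID then some (p.1, inner.getD segID 0) else none)

def orderBySegments_alt (interpolatedByProperty : List (String × List (String × Int))) : List (String × List (String × Int)) :=
  let segIDs := PySem.List.dedup (interpolatedByProperty.flatMap (fun p => p.2.map (·.1)))
  segIDs.map (fun s => (s, pvBRow interpolatedByProperty s))

-- ===== PRECONDITION & SPEC =====
-- Pre_ excludes association lists whose outer (property) keys repeat: such a list does not
-- represent a Python dict (A's argument is a dict, whose keys are necessarily distinct), so
-- A's behaviour on it is not defined by the Python source.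
def Pre_orderBySegments (interpolatedByProperty : List (String × List (String × Int))) : Prop :=
  (interpolatedByProperty.map (·.1)).Nodup

instance (interpolatedByProperty : List (String × List (String × Int))) : Decidable (Pre_orderBySegments interpolatedByProperty) := by unfold Pre_orderBySegments; infer_instance

def pvWitness_orderBySegments : (List (String × List (String × Int))) :=
  [("temp", [("1", 5), ("2", 7)]), ("hum", [("1", 3)])]

def Spec_orderBySegments (interpolatedByProperty : List (String × List (String × Int))) (out : List (String × List (String × Int))) : Prop := out = orderBySegments_alt interpolatedByProperty
instance (interpolatedByProperty : List (String × List (String × Int))) (out : List (String × List (String × Int))) : Decidable (Spec_orderBySegments interpolatedByProperty out) := by unfold Spec_orderBySegments; infer_instance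

-- ===== CLAIM (what is proved, stated in full; the proofs are below) =====
def Claim_equal_orderBySegments : Prop := ∀ (interpolatedByProperty : List (String × List (String × Int))), Dom_orderBySegments interpolatedByProperty → Pre_orderBySegments interpolatedByProperty → Spec_orderBySegments interpolatedByProperty (orderBySegments interpolatedByProperty)

-- ===== LEMMAS AND PROOFS =====

-- A's inner-loop body is a plain 'modify': the guarded pre-insertion of an empty dict is
-- exactly what modify with default empty does on an absent key.
theorem pvAStep_eq_modify (prop : String) (acc : PySem.Dict String (PySem.Dict String Int)) (q : String × Int) :
    pvAStep prop acc q = acc.modify q.1 PySem.Dict.empty (fun s => s.insert prop q.2) := by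
  unfold pvAStep
  by_cases h : acc.contains q.1
  · simp [h]
  · simp only [Bool.not_eq_true] at h
    simp only [h, Bool.false_eq_true, if_false, PySem.Dict.modify]
    rw [PySem.Dict.getD_insert_self, PySem.Dict.insert_insert_self,
        PySem.Dict.getD_of_not_contains _ _ h]

theorem pvAStep_fun_eq (prop : String) :
    pvAStep prop = fun d (x : String × Int) => d.modify x.1 PySem.Dict.empty (fun s => s.insert prop x.2) :=
  funext fun acc => funext fun q => pvAStep_eq_modify prop acc q

-- get?/contains of a dict built by update, in terms of the tail
theorem pv_contains_update (xs : List (String × Int)) (d : PySem.Dict String Int) (s : String) :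
    (d.update xs).contains s = ((PySem.Dict.ofList xs).contains s || d.contains s) := by
  induction xs generalizing d with
  | nil => simp [PySem.Dict.update, PySem.Dict.ofList]
  | cons x xs ih =>
    show ((d.insert x.1 x.2).update xs).contains s = _
    rw [ih]
    have : (PySem.Dict.ofList (x :: xs)).contains s
        = ((PySem.Dict.empty.insert x.1 x.2).update xs).contains s := rfl
    rw [this, ih]
    simp [PySem.Dict.contains_insert]
    by_cases h1 : (PySem.Dict.ofList xs).contains s <;>
      by_cases h2 : s = x.1 <;> simp [h1, h2]

theorem pv_get?_update (xs : List (String × Int)) (d : PySem.Dict String Int) (s : String) :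
    (d.update xs).get? s
      = if (PySem.Dict.ofList xs).contains s then (PySem.Dict.ofList xs).get? s else d.get? s := by
  induction xs generalizing d with
  | nil => simp [PySem.Dict.update, PySem.Dict.ofList]
  | cons x xs ih =>
    show ((d.insert x.1 x.2).update xs).get? s = _
    rw [ih]
    have hc : (PySem.Dict.ofList (x :: xs)).contains s
        = ((PySem.Dict.empty.insert x.1 x.2).update xs).contains s := rfl
    have hg : (PySem.Dict.ofList (x :: xs)).get? s
        = ((PySem.Dict.empty.insert x.1 x.2).update xs).get? s := rfl
    rw [hc, pv_contains_update, hg, ih]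
    by_cases h1 : (PySem.Dict.ofList xs).contains s <;>
      by_cases h2 : s = x.1 <;>
        simp [h1, h2, PySem.Dict.get?_insert, PySem.Dict.contains_insert]

theorem pv_ofList_cons_contains (x : String × Int) (xs : List (String × Int)) (s : String) :
    (PySem.Dict.ofList (x :: xs)).contains s = ((s == x.1) || (PySem.Dict.ofList xs).contains s) := by
  show ((PySem.Dict.empty.insert x.1 x.2).update xs).contains s = _
  rw [pv_contains_update]
  by_cases h1 : (PySem.Dict.ofList xs).contains s <;>
    by_cases h2 : s = x.1 <;> simp [h1, h2, PySem.Dict.contains_insert]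

theorem pv_ofList_cons_getD (x : String × Int) (xs : List (String × Int)) (s : String) :
    (PySem.Dict.ofList (x :: xs)).getD s 0
      = if (PySem.Dict.ofList xs).contains s then (PySem.Dict.ofList xs).getD s 0
        else if s = x.1 then x.2 else 0 := by
  show ((PySem.Dict.empty.insert x.1 x.2).update xs).getD s 0 = _
  rw [PySem.Dict.getD_eq_get?_getD, pv_get?_update]
  by_cases h2 : s = x.1
  · subst h2
    by_cases h1 : (PySem.Dict.ofList xs).contains x.1 <;>
      simp [h1, PySem.Dict.getD_eq_get?_getD]
  · by_cases h1 : (PySem.Dict.ofList xs).contains s <;>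
      simp [h1, h2, PySem.Dict.get?_insert, PySem.Dict.getD_eq_get?_getD]

-- what one inner loop (over one property's segment dict) does to the entry at segment s
theorem pv_inner_getD (q : List (String × Int)) (prop : String)
    (acc : PySem.Dict String (PySem.Dict String Int)) (s : String) :
    (q.foldl (pvAStep prop) acc).getD s PySem.Dict.empty
      = if (PySem.Dict.ofList q).contains s
        then (acc.getD s PySem.Dict.empty).insert prop ((PySem.Dict.ofList q).getD s 0)
        else acc.getD s PySem.Dict.empty := by
  induction q generalizing acc with
  | nil => simp [PySem.Dict.ofList, PySem.Dict.update]
  | cons x q ih =>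
    rw [List.foldl_cons, ih, pv_ofList_cons_contains, pv_ofList_cons_getD,
        pvAStep_eq_modify]
    by_cases h2 : s = x.1
    · subst h2
      by_cases h1 : (PySem.Dict.ofList q).contains x.1 <;>
        simp [h1, PySem.Dict.insert_insert_self]
    · by_cases h1 : (PySem.Dict.ofList q).contains s <;>
        simp [h1, h2, PySem.Dict.getD_modify]

theorem pv_inner_keys (q : List (String × Int)) (prop : String)
    (acc : PySem.Dict String (PySem.Dict String Int)) :
    (q.foldl (pvAStep prop) acc).keys = PySem.Set.update acc.keys (q.map (·.1)) := by
  rw [pvAStep_fun_eq]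
  exact PySem.Dict.keys_foldl_modify_key q (·.1) PySem.Dict.empty
    (fun _ x => fun s => s.insert prop x.2) acc

theorem pv_inner_nodup (q : List (String × Int)) (prop : String)
    (acc : PySem.Dict String (PySem.Dict String Int)) (h : acc.keys.Nodup) :
    (q.foldl (pvAStep prop) acc).keys.Nodup := by
  rw [pvAStep_fun_eq]
  exact PySem.Dict.nodup_keys_foldl_modify_key q (·.1) PySem.Dict.empty
    (fun _ x => fun s => s.insert prop x.2) acc h

-- main invariant of A's outer loop
theorem pv_outer_invariant (l : List (String × List (String × Int)))
    (acc : PySem.Dict String (PySem.Dict String Int))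
    (hnd : acc.keys.Nodup) (hl : (l.map (·.1)).Nodup)
    (hfresh : ∀ s, ∀ p ∈ l, (acc.getD s PySem.Dict.empty).contains p.1 = false) :
    (l.foldl pvAOuter acc).keys
        = PySem.Set.update acc.keys (l.flatMap (fun p => p.2.map (·.1)))
    ∧ ∀ s, ((l.foldl pvAOuter acc).getD s PySem.Dict.empty).items
        = (acc.getD s PySem.Dict.empty).items ++ pvBRow l s := by
  induction l generalizing acc with
  | nil => simp [pvBRow]
  | cons p l ih =>
    simp only [List.foldl_cons]
    have hacc' : ∀ s, (pvAOuter acc p).getD s PySem.Dict.empty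
        = if (PySem.Dict.ofList p.2).contains s
          then (acc.getD s PySem.Dict.empty).insert p.1 ((PySem.Dict.ofList p.2).getD s 0)
          else acc.getD s PySem.Dict.empty := fun s => pv_inner_getD p.2 p.1 acc s
    have hnd' : (pvAOuter acc p).keys.Nodup := pv_inner_nodup p.2 p.1 acc hnd
    have hl' : (l.map (·.1)).Nodup := (List.nodup_cons.mp hl).2
    have hp1 : p.1 ∉ l.map (·.1) := (List.nodup_cons.mp hl).1
    have hfresh' : ∀ s, ∀ r ∈ l, ((pvAOuter acc p).getD s PySem.Dict.empty).contains r.1 = false := by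
      intro s r hr
      have hne : r.1 ≠ p.1 := by
        intro h; exact hp1 (h ▸ List.mem_map_of_mem hr)
      have hold : (acc.getD s PySem.Dict.empty).contains r.1 = false :=
        hfresh s r (List.mem_cons_of_mem _ hr)
      rw [hacc' s]
      by_cases hc : (PySem.Dict.ofList p.2).contains s
      · simp [hc, PySem.Dict.contains_insert, hold, hne]
      · simp [hc, hold]
    obtain ⟨ihk, ihv⟩ := ih (pvAOuter acc p) hnd' hl' hfresh'
    constructor
    · rw [ihk]
      have : (pvAOuter acc p).keys = PySem.Set.update acc.keys (p.2.map (·.1)) :=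
        pv_inner_keys p.2 p.1 acc
      rw [this, ← PySem.Set.update_append, List.flatMap_cons]
    · intro s
      rw [ihv s, hacc' s]
      have hPBcons : pvBRow (p :: l) s
          = (if (PySem.Dict.ofList p.2).contains s
             then [(p.1, (PySem.Dict.ofList p.2).getD s 0)] else []) ++ pvBRow l s := by
        unfold pvBRow
        rw [List.filterMap_cons]
        by_cases hc : (PySem.Dict.ofList p.2).contains s <;> simp [hc]
      rw [hPBcons]
      by_cases hc : (PySem.Dict.ofList p.2).contains s
      · rw [if_pos hc, if_pos hc,
            PySem.Dict.items_insert_of_not_contains _ _ (hfresh s p (List.mem_cons_self))]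
        simp
      · simp [hc]

-- ===== VERDICT (by name: the statement is the Claim_ definition above) =====
theorem orderBySegments_spec : Claim_equal_orderBySegments := by
  intro l _ hpre
  unfold Spec_orderBySegments orderBySegments orderBySegments_alt
  dsimp only
  have hfresh : ∀ s, ∀ p ∈ l, ((PySem.Dict.empty : PySem.Dict String (PySem.Dict String Int)).getD s PySem.Dict.empty).contains p.1 = false := by
    intro s p _; simp
  obtain ⟨hk, hv⟩ := pv_outer_invariant l PySem.Dict.empty (by simp) hpre hfresh
  have hnodup : (l.foldl pvAOuter PySem.Dict.empty).keys.Nodup := by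
    rw [hk]; exact PySem.Set.nodup_update _ _ (by simp)
  rw [PySem.Dict.items_eq_map_keys _ hnodup PySem.Dict.empty, List.map_map, hk]
  have hkeys : PySem.Set.update ((PySem.Dict.empty : PySem.Dict String (PySem.Dict String Int)).keys)
      (l.flatMap (fun p => p.2.map (·.1)))
      = PySem.List.dedup (l.flatMap (fun p => p.2.map (·.1))) := by
    rw [show (PySem.Dict.empty : PySem.Dict String (PySem.Dict String Int)).keys = [] from rfl]
    rfl
  rw [hkeys]
  apply List.map_congr_left
  intro s _
  simp only [Function.comp]
  rw [hv s, PySem.Dict.getD_of_not_contains _ _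
        (by simp : (PySem.Dict.empty : PySem.Dict String (PySem.Dict String Int)).contains s = false)]
  simp [PySem.Dict.empty]
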